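-- pv_equiv track=rewrite | github.com/MohammedHamzaMalik/100daysofcodewithGFG | Day 20 - 29/26 - Day/solution.py | ValidPair
-- ===== SOURCE A (Python) =====
-- import bisect
--
-- def ValidPair(a, n):
--     # Your code goes here
--     # sort the given array
--     a.sort()
--     # make a variable to store the count
--     ans = 0
--
--     # iterating over the array using a for loop
--     for i in range(n - 1):
--         if a[i] > 0:
--             k = n - i - 1
--             ans += k * (k + 1) // 2
--             return ans
--         # finding the index using the bisect
--         ind = bisect.bisect_left(a, 1 - a[i])
--         if ind < n:
--             ans += n - ind
--
--     return ans
-- ===== SOURCE B (Python) =====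
-- def ValidPair(a, n):
--     # Sorts a in place like the original, then counts the pairs i<j<n with
--     # a[i]+a[j] > 0 with a classic two-pointer sweep from both ends: no bisect,
--     # no early-return shortcut.
--     a.sort()
--     ans = 0
--     l, r = 0, n - 1
--     while l < r:
--         if a[l] + a[r] > 0:
--             ans += r - l
--             r -= 1
--         else:
--             l += 1
--     return ans
-- ===== Notes on version B (the rewrite author's own statement) =====
-- stated objective: alternative
-- what changed: Replaces A's per-element bisect_left search and positive-block early-return formula with a classic two-pointer sweep from both ends of the sorted prefix that counts pairs with positive sum directly (one while loop moving l up / r down).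
-- outside the precondition, e.g. on ValidPair([1], 5): A returns 10, B raises IndexError; on ValidPair([0, 1], 3): A returns 3, B raises IndexError
import Mathlib
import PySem

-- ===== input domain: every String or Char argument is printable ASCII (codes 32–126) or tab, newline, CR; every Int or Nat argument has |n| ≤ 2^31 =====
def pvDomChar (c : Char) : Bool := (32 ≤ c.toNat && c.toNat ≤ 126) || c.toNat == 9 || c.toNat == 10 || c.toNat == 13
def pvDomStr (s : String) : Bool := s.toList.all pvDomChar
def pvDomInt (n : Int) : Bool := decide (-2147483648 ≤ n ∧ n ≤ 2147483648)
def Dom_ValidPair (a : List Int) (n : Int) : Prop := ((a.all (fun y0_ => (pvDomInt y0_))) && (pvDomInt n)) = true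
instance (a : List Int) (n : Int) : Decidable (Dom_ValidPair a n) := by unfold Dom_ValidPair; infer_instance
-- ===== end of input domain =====

-- B replaces A's per-element bisect_left search (with its positive-block shortcut
-- formula) by a classic two-pointer sweep from both ends of the sorted prefix,
-- counting pairs with positive sum directly; both sort `a` in place in Python,
-- and the equivalence proved here is about the return value.

-- ===== PORT A =====
-- the `for i in range(n-1)` loop of A, with early return on the first positive
-- element; `range(n-1)` is consumed lazily in Python, so the loop is ported as
-- index recursion guarded by `i < n - 1` with fuel (n-1).toNat = the trip count
def pvLoopA (s : List Int) (n : Int) : Nat → Int → Int → Int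
  | 0, _, ans => ans
  | f + 1, i, ans =>
    if i < n - 1 then
      match PySem.List.pyGet? s i with
      | none => ans  -- unreachable under Pre_ (Python raises IndexError here)
      | some ai =>
        if ai > 0 then
          let k := n - i - 1
          ans + PySem.Int.floordiv (k * (k + 1)) 2
        else
          let ind : Int := (PySem.List.bisectLeft s (1 - ai) : Nat)
          pvLoopA s n f (i + 1) (if ind < n then ans + (n - ind) else ans)
    else ans

def ValidPair (a : List Int) (n : Int) : Int :=
  let s := PySem.List.sorted a (fun x => x) false
  pvLoopA s n (n - 1).toNat 0 0

-- ===== PORT B =====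
-- the `while l < r` two-pointer sweep of B; each trip shrinks r - l by one, so
-- fuel (n-1).toNat bounds the trip count
def pvLoopB (s : List Int) : Nat → Int → Int → Int → Int
  | 0, _, _, ans => ans
  | f + 1, l, r, ans =>
    if l < r then
      match PySem.List.pyGet? s l, PySem.List.pyGet? s r with
      | some x, some y =>
        if x + y > 0 then pvLoopB s f l (r - 1) (ans + (r - l))
        else pvLoopB s f (l + 1) r ans
      | _, _ => ans  -- unreachable under Pre_ (Python raises IndexError here)
    else ans

def ValidPair_alt (a : List Int) (n : Int) : Int :=
  let s := PySem.List.sorted a (fun x => x) false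
  pvLoopB s (n - 1).toNat 0 (n - 1) 0

-- ===== PRECONDITION & SPEC =====
-- Pre_ excludes n > max(len(a), 1): there A either raises IndexError or (when it
-- meets a positive element before running off the end) returns a count that
-- treats phantom positions past the end of the list as valid partners, while
-- B's two-pointer naturally raises IndexError at a[n-1].
def Pre_ValidPair (a : List Int) (n : Int) : Prop :=
  n ≤ (a.length : Int) ∨ n ≤ 1
instance (a : List Int) (n : Int) : Decidable (Pre_ValidPair a n) := by
  unfold Pre_ValidPair; infer_instance

def pvWitness_ValidPair : List Int × Int := ([0, -2, 3], 3)

def Spec_ValidPair (a : List Int) (n : Int) (out : Int) : Prop := out = ValidPair_alt a n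
instance (a : List Int) (n : Int) (out : Int) : Decidable (Spec_ValidPair a n out) := by
  unfold Spec_ValidPair; infer_instance

-- ===== CLAIM (what is proved, stated in full; the proofs are below) =====
def Claim_equal_ValidPair : Prop := ∀ (a : List Int) (n : Int), Dom_ValidPair a n → Pre_ValidPair a n → Spec_ValidPair a n (ValidPair a n)

-- ===== LEMMAS AND PROOFS =====

-- the common specification both loops are proved equal to: the number of index
-- pairs l ≤ p < q < n with s[p] + s[q] > 0
def pvPairCnt (s : List Int) (l : Nat) (n : Nat) : Nat :=
  ∑ q ∈ Finset.range n, ∑ p ∈ Finset.range q,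
    if l ≤ p ∧ 0 < s.getD p 0 + s.getD q 0 then 1 else 0

theorem pv_sum_ind_ge (r l : Nat) :
    (∑ p ∈ Finset.range r, if l ≤ p then 1 else 0) = r - l := by
  induction r with
  | zero => simp
  | succ r ih =>
    rw [Finset.sum_range_succ, ih]
    split_ifs <;> omega

theorem pairwise_getD_le (s : List Int) (hs : s.Pairwise (· ≤ ·))
    {p q : Nat} (hpq : p ≤ q) (hq : q < s.length) :
    s.getD p 0 ≤ s.getD q 0 := by
  rcases Nat.eq_or_lt_of_le hpq with h | h
  · subst h; exact le_refl _
  · rw [List.getD_eq_getElem s 0 (n:=p) (by omega), List.getD_eq_getElem s 0 (n:=q) hq]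
    exact List.pairwise_iff_getElem.mp hs p q (by omega) hq h

theorem pvPairCnt_zero (s : List Int) (l n : Nat) (h : n ≤ l + 1) :
    pvPairCnt s l n = 0 := by
  unfold pvPairCnt
  apply Finset.sum_eq_zero
  intro q hq
  apply Finset.sum_eq_zero
  intro p hp
  simp only [Finset.mem_range] at hq hp
  rw [if_neg]
  omega

-- removing the top row q = r when s[l] + s[r] > 0: all p in [l, r) pair with r
theorem pvPairCnt_top (s : List Int) (hs : s.Pairwise (· ≤ ·))
    (l r : Nat) (hr : r < s.length)
    (hsum : 0 < s.getD l 0 + s.getD r 0) :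
    pvPairCnt s l (r + 1) = pvPairCnt s l r + (r - l) := by
  unfold pvPairCnt
  rw [Finset.sum_range_succ]
  congr 1
  rw [← pv_sum_ind_ge r l]
  apply Finset.sum_congr rfl
  intro p hp
  simp only [Finset.mem_range] at hp
  by_cases hlp : l ≤ p
  · have : s.getD l 0 ≤ s.getD p 0 := pairwise_getD_le s hs hlp (by omega)
    rw [if_pos ⟨hlp, by omega⟩, if_pos hlp]
  · rw [if_neg (by tauto), if_neg hlp]

-- dropping the left column p = l when s[l] + s[r] ≤ 0: l pairs with no q ≤ r
theorem pvPairCnt_left (s : List Int) (hs : s.Pairwise (· ≤ ·))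
    (l r : Nat) (hr : r < s.length)
    (hsum : s.getD l 0 + s.getD r 0 ≤ 0) :
    pvPairCnt s l (r + 1) = pvPairCnt s (l + 1) (r + 1) := by
  unfold pvPairCnt
  apply Finset.sum_congr rfl
  intro q hq
  apply Finset.sum_congr rfl
  intro p hp
  simp only [Finset.mem_range] at hq hp
  by_cases hpl : p = l
  · subst hpl
    have hq' : s.getD q 0 ≤ s.getD r 0 := pairwise_getD_le s hs (by omega) hr
    rw [if_neg (by omega), if_neg (by omega)]
  · simp only [show (l ≤ p) ↔ (l + 1 ≤ p) from by omega]

-- splitting off the leftmost column p = i of the count (pointwise in q)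
theorem pv_row_split (C : Nat → Prop) [DecidablePred C] (i q : Nat) :
    (∑ p ∈ Finset.range q, if i ≤ p ∧ C p then 1 else 0)
      = (if i < q ∧ C i then 1 else 0)
        + ∑ p ∈ Finset.range q, if i + 1 ≤ p ∧ C p then 1 else 0 := by
  induction q with
  | zero => simp
  | succ q ih =>
    rw [Finset.sum_range_succ, Finset.sum_range_succ, ih]
    by_cases hiq : i = q
    · subst hiq
      by_cases h1 : C i <;>
        simp only [h1, and_true, and_false, if_false] <;>
        first
          | omega
          | (split_ifs <;> omega)
    · by_cases h1 : C i <;> by_cases h2 : C q <;>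
        simp only [h1, h2, and_true, and_false, if_false] <;>
        first
          | omega
          | (split_ifs <;> omega)

theorem pvPairCnt_row (s : List Int) (i n : Nat) :
    pvPairCnt s i n
      = (∑ q ∈ Finset.range n,
          if i < q ∧ 0 < s.getD i 0 + s.getD q 0 then 1 else 0)
        + pvPairCnt s (i + 1) n := by
  unfold pvPairCnt
  rw [← Finset.sum_add_distrib]
  apply Finset.sum_congr rfl
  intro q _
  exact pv_row_split (fun p => 0 < s.getD p 0 + s.getD q 0) i q

-- the leftmost column counted by bisect: q qualifies iff bisectLeft ≤ q
theorem pvPairCnt_row_bisect (s : List Int) (hs : s.Pairwise (· ≤ ·))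
    (i n : Nat) (hn : n ≤ s.length) (hi : i < n)
    (hnp : s.getD i 0 ≤ 0) :
    (∑ q ∈ Finset.range n,
        if i < q ∧ 0 < s.getD i 0 + s.getD q 0 then 1 else 0)
      = n - PySem.List.bisectLeft s (1 - s.getD i 0) := by
  set t : Int := 1 - s.getD i 0 with ht
  rcases PySem.List.bisectLeft_spec s t hs with ⟨hb1, hb2, hb3⟩
  set bl := PySem.List.bisectLeft s t with hbl
  have hibl : i < bl := by
    by_contra hc
    have := hb3 i (by omega) (by omega)
    rw [List.getD_eq_getElem s 0 (n:=i) (by omega)] at hnp ht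
    omega
  rw [← pv_sum_ind_ge n bl]
  apply Finset.sum_congr rfl
  intro q hq
  simp only [Finset.mem_range] at hq
  have hqlen : q < s.length := by omega
  have hgq : s.getD q 0 = s[q] := List.getD_eq_getElem s 0 hqlen
  by_cases h : bl ≤ q
  · have := hb3 q hqlen h
    rw [if_pos ⟨by omega, by rw [hgq]; omega⟩, if_pos h]
  · have := hb2 q hqlen (by omega)
    rw [if_neg (by rw [hgq]; omega), if_neg h]

-- all-positive tail: every pair i ≤ p < q < n qualifies
theorem pv_sum_shift (i : Nat) : ∀ m : Nat,
    (∑ q ∈ Finset.range (i + m), (q - i)) = ∑ q ∈ Finset.range m, q := by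
  intro m
  induction m with
  | zero =>
    simp only [Nat.add_zero]
    rw [Finset.sum_congr rfl (fun q hq => by
      simp only [Finset.mem_range] at hq
      omega : ∀ q ∈ Finset.range i, q - i = 0)]
    simp
  | succ m ih =>
    rw [show i + (m + 1) = (i + m) + 1 by omega, Finset.sum_range_succ,
      Finset.sum_range_succ, ih]
    omega

theorem pvPairCnt_pos (s : List Int) (hs : s.Pairwise (· ≤ ·))
    (i n : Nat) (hn : n ≤ s.length) (hi : i < n)
    (hpos : 0 < s.getD i 0) :
    pvPairCnt s i n = ∑ q ∈ Finset.range (n - i), q := by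
  have h1 : pvPairCnt s i n = ∑ q ∈ Finset.range n, (q - i) := by
    unfold pvPairCnt
    apply Finset.sum_congr rfl
    intro q hq
    simp only [Finset.mem_range] at hq
    rw [← pv_sum_ind_ge q i]
    apply Finset.sum_congr rfl
    intro p hp
    simp only [Finset.mem_range] at hp
    by_cases hip : i ≤ p
    · have hp1 : s.getD i 0 ≤ s.getD p 0 := pairwise_getD_le s hs hip (by omega)
      have hp2 : s.getD p 0 ≤ s.getD q 0 := pairwise_getD_le s hs (by omega) (by omega)
      rw [if_pos ⟨hip, by omega⟩, if_pos hip]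
    · rw [if_neg (by tauto), if_neg hip]
  rw [h1]
  have hsh := pv_sum_shift i (n - i)
  rw [show i + (n - i) = n by omega] at hsh
  rw [hsh]

-- Gauss value of the tail count, matched to A's k*(k+1)//2 in Int
theorem pvPairCnt_pos_val (s : List Int) (hs : s.Pairwise (· ≤ ·))
    (i n : Nat) (hn : n ≤ s.length) (hi : i + 1 < n)
    (hpos : 0 < s.getD i 0) :
    (pvPairCnt s i n : Int)
      = PySem.Int.floordiv (((n : Int) - i - 1) * (((n : Int) - i - 1) + 1)) 2 := by
  rw [pvPairCnt_pos s hs i n hn (by omega) hpos]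
  have hG : (∑ q ∈ Finset.range (n - i), q) * 2 = (n - i) * (n - i - 1) :=
    Finset.sum_range_id_mul_two (n - i)
  rw [PySem.Int.floordiv_eq_ediv_of_pos (by omega)]
  have hcast : ((n : Int) - i - 1) * (((n : Int) - i - 1) + 1)
      = ((∑ q ∈ Finset.range (n - i), q : Nat) : Int) * 2 := by
    have h1 : ((n - i : Nat) : Int) = (n : Int) - i := by omega
    have h2 : ((n - i - 1 : Nat) : Int) = (n : Int) - i - 1 := by omega
    calc ((n : Int) - i - 1) * (((n : Int) - i - 1) + 1)
        = ((n - i - 1 : Nat) : Int) * ((n - i : Nat) : Int) := by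
          rw [h1, h2]; ring
      _ = (((n - i) * (n - i - 1) : Nat) : Int) := by push_cast; ring
      _ = ((∑ q ∈ Finset.range (n - i), q : Nat) : Int) * 2 := by
          rw [← hG]; push_cast; ring
  rw [hcast, Int.mul_ediv_cancel _ (by omega)]

-- A's loop computes the pair count from column i on
theorem pvLoopA_eq (s : List Int) (n : Int) (hs : s.Pairwise (· ≤ ·))
    (hn : n ≤ (s.length : Int)) :
    ∀ (fuel : Nat) (i ans : Int), 0 ≤ i → n - 1 - i ≤ (fuel : Int) →
    pvLoopA s n fuel i ans = ans + (pvPairCnt s i.toNat n.toNat : Int) := by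
  intro fuel
  induction fuel with
  | zero =>
    intro i ans hi hf
    rw [pvPairCnt_zero s _ _ (by omega)]
    simp [pvLoopA]
  | succ f ih =>
    intro i ans hi hf
    unfold pvLoopA
    by_cases hend : i < n - 1
    · simp only [hend, if_true]
      have hilen : i.toNat < s.length := by omega
      rw [PySem.List.pyGet?_eq_some_getElem s hi (by omega)]
      have hgi : s.getD i.toNat 0 = s[i.toNat] := List.getD_eq_getElem s 0 hilen
      by_cases hpos : s[i.toNat] > 0
      · simp only [hpos, if_true]
        rw [pvPairCnt_pos_val s hs i.toNat n.toNat (by omega) (by omega)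
          (by rw [hgi]; exact hpos)]
        have hn' : ((n.toNat : Nat) : Int) = n := by omega
        have hi' : ((i.toNat : Nat) : Int) = i := by omega
        rw [hn', hi']
      · simp only [hpos, if_false]
        rw [ih (i + 1) _ (by omega) (by omega)]
        have hrow := pvPairCnt_row s i.toNat n.toNat
        rw [pvPairCnt_row_bisect s hs i.toNat n.toNat (by omega) (by omega) (by omega)]
          at hrow
        rw [hgi] at hrow
        rcases PySem.List.bisectLeft_spec s (1 - s[i.toNat]) hs with ⟨hb1, _, _⟩
        have hi1 : (i + 1).toNat = i.toNat + 1 := by omega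
        rw [hi1] at *
        split_ifs with hcmp <;> rw [hrow] <;> push_cast <;> omega
    · simp only [hend, if_false]
      rw [pvPairCnt_zero s _ _ (by omega)]
      simp

-- B's loop computes the pair count of the window [l, r]
theorem pvLoopB_eq (s : List Int) (hs : s.Pairwise (· ≤ ·)) :
    ∀ (fuel : Nat) (l r ans : Int), 0 ≤ l → r < (s.length : Int) →
    r - l ≤ (fuel : Int) →
    pvLoopB s fuel l r ans = ans + (pvPairCnt s l.toNat (r + 1).toNat : Int) := by
  intro fuel
  induction fuel with
  | zero =>
    intro l r ans hl hr hf
    rw [pvPairCnt_zero s _ _ (by omega)]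
    simp [pvLoopB]
  | succ f ih =>
    intro l r ans hl hr hf
    unfold pvLoopB
    by_cases hlr : l < r
    · simp only [hlr, if_true]
      have hllen : l.toNat < s.length := by omega
      have hrlen : r.toNat < s.length := by omega
      rw [PySem.List.pyGet?_eq_some_getElem s hl (by omega),
        PySem.List.pyGet?_eq_some_getElem s (by omega : (0:Int) ≤ r) (by omega)]
      have hgl : s.getD l.toNat 0 = s[l.toNat] := List.getD_eq_getElem s 0 hllen
      have hgr : s.getD r.toNat 0 = s[r.toNat] := List.getD_eq_getElem s 0 hrlen
      by_cases hsum : s[l.toNat] + s[r.toNat] > 0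
      · simp only [hsum, if_true]
        rw [ih l (r - 1) _ hl (by omega) (by omega)]
        have htop := pvPairCnt_top s hs l.toNat r.toNat hrlen
          (by rw [hgl, hgr]; omega)
        have h1 : (r - 1 + 1).toNat = r.toNat := by omega
        have h2 : (r + 1).toNat = r.toNat + 1 := by omega
        rw [h1, h2, htop]
        push_cast
        omega
      · simp only [hsum, if_false]
        rw [ih (l + 1) r ans (by omega) hr (by omega)]
        have hleft := pvPairCnt_left s hs l.toNat r.toNat hrlen
          (by rw [hgl, hgr]; omega)
        have h1 : (l + 1).toNat = l.toNat + 1 := by omega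
        have h2 : (r + 1).toNat = r.toNat + 1 := by omega
        rw [h1, h2, hleft]
    · simp only [hlr, if_false]
      rw [pvPairCnt_zero s _ _ (by omega)]
      simp

-- ===== VERDICT (by name: the statement is the Claim_ definition above) =====
theorem ValidPair_spec : Claim_equal_ValidPair := by
  intro a n _ hpre
  unfold Spec_ValidPair ValidPair ValidPair_alt
  have hs : (PySem.List.sorted a (fun x => x) false).Pairwise (· ≤ ·) :=
    PySem.List.sorted_pairwise a (fun x => x)
  have hlen : (PySem.List.sorted a (fun x => x) false).length = a.length :=
    PySem.List.length_sorted a (fun x => x) false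
  set s := PySem.List.sorted a (fun x => x) false with hsdef
  rcases hpre with hle | hle1
  · rw [pvLoopA_eq s n hs (by omega) (n - 1).toNat 0 0 (by omega) (by omega),
      pvLoopB_eq s hs (n - 1).toNat 0 (n - 1) 0 (by omega) (by omega) (by omega)]
    have : (n - 1 + 1) = n := by omega
    rw [this]
  · have hf : (n - 1).toNat = 0 := by omega
    rw [hf]
    rfl
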